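-- pv_equiv track=rewrite | github.com/kevin123488/algorithm | 이전/2024/3월/0327/2022_kakao_신신고결과받기.py | find_re
-- ===== SOURCE A (Python) =====
-- def find_re(text):
--     reporter = ''
--     reportee = ''
--     flag = 0
--     for i in text:
--         if i == ' ':
--             flag = 1
--         else:
--             if flag == 0:
--                 reporter += i
--             else:
--                 reportee += i
--
--     return reporter, reportee
-- ===== SOURCE B (Python) =====
-- def find_re(text):
--     i = text.find(' ')
--     if i == -1:
--         return text, ''
--     return text[:i], text[i + 1:].replace(' ', '')
-- ===== Notes on version B (the rewrite author's own statement) =====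
-- stated objective: idiomatic
-- what changed: Replaces the flag-based single-pass character accumulator with library calls: find the first space, slice the string around it, and drop remaining spaces with replace.
import Mathlib
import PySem

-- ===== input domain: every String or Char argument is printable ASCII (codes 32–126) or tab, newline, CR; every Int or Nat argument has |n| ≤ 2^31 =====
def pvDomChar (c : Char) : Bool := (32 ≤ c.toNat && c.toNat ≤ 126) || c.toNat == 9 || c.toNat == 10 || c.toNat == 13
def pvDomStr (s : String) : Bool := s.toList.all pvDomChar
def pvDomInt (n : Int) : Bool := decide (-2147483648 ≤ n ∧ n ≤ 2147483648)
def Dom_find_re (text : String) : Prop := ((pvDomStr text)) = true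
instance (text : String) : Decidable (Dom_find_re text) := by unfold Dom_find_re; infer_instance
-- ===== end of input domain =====

-- B replaces A's flag-based single-pass character accumulator with find-the-first-space + slice + replace (idiomatic; same cost).

-- ===== PORT A =====
-- the for-loop over the characters of text, with the two string accumulators and the flag
def find_re_loop : List Char → String → String → Nat → String × String
  | [], rep, ree, _ => (rep, ree)
  | c :: cs, rep, ree, flag =>
    if c = ' ' then find_re_loop cs rep ree 1
    else if flag = 0 then find_re_loop cs (rep.push c) ree flag
    else find_re_loop cs rep (ree.push c) flag

def find_re (text : String) : String × String :=
  find_re_loop text.toList "" "" 0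

-- ===== PORT B =====
def find_re_alt (text : String) : String × String :=
  let i := PySem.Str.find text " "
  if i = -1 then (text, "")
  else (PySem.Str.slice text none (some i),
        PySem.Str.replace (PySem.Str.slice text (some (i + 1)) none) " " "")

-- ===== PRECONDITION & SPEC =====
def Spec_find_re (text : String) (out : String × String) : Prop := out = find_re_alt text
instance (text : String) (out : String × String) : Decidable (Spec_find_re text out) := by unfold Spec_find_re; infer_instance

-- ===== CLAIM (what is proved, stated in full; the proofs are below) =====
def Claim_equal_find_re : Prop := ∀ (text : String), Dom_find_re text → Spec_find_re text (find_re text)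


-- ===== LEMMAS AND PROOFS =====

-- the character predicate "is not a space", in simp's normal form
def pvNS (c : Char) : Bool := !decide (c = ' ')

-- the loop with flag = 1 just filters out spaces into reportee
theorem find_re_loop_one (cs : List Char) (rep ree : String) :
    find_re_loop cs rep ree 1 = (rep, String.ofList (ree.toList ++ cs.filter pvNS)) := by
  induction cs generalizing ree with
  | nil => simp [find_re_loop]
  | cons c cs ih =>
    by_cases hc : c = ' '
    · subst hc; simp [find_re_loop, ih, pvNS]
    · simp [find_re_loop, hc, ih, pvNS]

-- the loop with flag = 0: reporter gets the prefix before the first space,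
-- reportee the space-filtered remainder after it
theorem find_re_loop_zero (cs : List Char) (rep ree : String) :
    find_re_loop cs rep ree 0 =
      (String.ofList (rep.toList ++ cs.takeWhile pvNS),
       String.ofList (ree.toList ++ (((cs.dropWhile pvNS).drop 1).filter pvNS))) := by
  induction cs generalizing rep with
  | nil => simp [find_re_loop]
  | cons c cs ih =>
    by_cases hc : c = ' '
    · subst hc
      simp [find_re_loop, find_re_loop_one, pvNS]
    · simp [find_re_loop, hc, ih, pvNS]

theorem pv_length_takeWhile_le (cs : List Char) : (cs.takeWhile pvNS).length ≤ cs.length := by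
  induction cs with
  | nil => simp
  | cons c cs ih =>
    by_cases hc : pvNS c = true
    · simp [hc]; omega
    · simp [hc]

-- characterisation of find.go for the single-character pattern " "
theorem find_go_space (cs : List Char) (k : Nat) :
    PySem.Chars.find.go [' '] cs k =
      if ' ' ∈ cs then ((k : Int) + (cs.takeWhile pvNS).length) else -1 := by
  induction cs generalizing k with
  | nil => simp [PySem.Chars.find.go]
  | cons c cs ih =>
    by_cases hc : c = ' '
    · subst hc
      have hpre : List.isPrefixOf [' '] (' ' :: cs) = true := by simp [List.isPrefixOf]
      rw [show PySem.Chars.find.go [' '] (' ' :: cs) k = (k : Int) from by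
        simp [PySem.Chars.find.go, hpre]]
      rw [if_pos (List.mem_cons_self)]
      simp [pvNS]
    · have hpre : List.isPrefixOf [' '] (c :: cs) = false := by
        simp [List.isPrefixOf]
        intro h; exact absurd h.symm hc
      rw [show PySem.Chars.find.go [' '] (c :: cs) k = PySem.Chars.find.go [' '] cs (k + 1) from by
        simp [PySem.Chars.find.go, hpre]]
      rw [ih (k + 1)]
      have htw : (c :: cs).takeWhile pvNS = c :: cs.takeWhile pvNS := by
        simp [pvNS, hc]
      by_cases hm : ' ' ∈ cs
      · rw [if_pos hm, if_pos (List.mem_cons_of_mem _ hm), htw]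
        simp; omega
      · rw [if_neg hm, if_neg (by
          simp [List.mem_cons]
          exact ⟨fun h => hc h.symm, hm⟩)]

theorem find_space (cs : List Char) :
    PySem.Chars.find cs [' '] =
      if ' ' ∈ cs then (((cs.takeWhile pvNS).length : Nat) : Int) else -1 := by
  have := find_go_space cs 0
  simpa [PySem.Chars.find] using this

-- replace with single-char pattern " " and empty replacement is filter
theorem replace_go_space (fuel : Nat) : ∀ (l acc : List Char), l.length ≤ fuel →
    PySem.Chars.replace.go [' '] [] fuel l acc = acc.reverse ++ l.filter pvNS := by
  induction fuel with
  | zero =>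
    intro l acc h
    have : l = [] := by cases l <;> simp_all
    subst this; simp [PySem.Chars.replace.go]
  | succ fuel ih =>
    intro l acc h
    cases l with
    | nil => simp [PySem.Chars.replace.go]
    | cons c t =>
      by_cases hc : c = ' '
      · subst hc
        have hpre : List.isPrefixOf [' '] (' ' :: t) = true := by simp [List.isPrefixOf]
        rw [show PySem.Chars.replace.go [' '] [] (fuel + 1) (' ' :: t) acc
              = PySem.Chars.replace.go [' '] [] fuel t acc from by
          simp [PySem.Chars.replace.go, hpre]]
        rw [ih t acc (by simpa using Nat.le_of_succ_le_succ h)]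
        simp [pvNS]
      · have hpre : List.isPrefixOf [' '] (c :: t) = false := by
          simp [List.isPrefixOf]
          intro h'; exact absurd h'.symm hc
        rw [show PySem.Chars.replace.go [' '] [] (fuel + 1) (c :: t) acc
              = PySem.Chars.replace.go [' '] [] fuel t (c :: acc) from by
          simp [PySem.Chars.replace.go, hpre]]
        rw [ih t (c :: acc) (by simpa using Nat.le_of_succ_le_succ h)]
        simp [pvNS, hc]

theorem replace_space (l : List Char) :
    PySem.Chars.replace l [' '] [] = l.filter pvNS := by
  simpa using replace_go_space l.length l [] (le_refl _)

theorem pv_take_len_takeWhile (cs : List Char) :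
    cs.take ((cs.takeWhile pvNS).length) = cs.takeWhile pvNS := by
  induction cs with
  | nil => simp
  | cons c cs ih =>
    by_cases hc : pvNS c = true
    · simp [hc, ih]
    · simp [hc]

theorem pv_drop_len_succ (l1 l2 : List Char) : (l1 ++ l2).drop (l1.length + 1) = l2.drop 1 := by
  induction l1 with
  | nil => simp
  | cons c t ih => simp [ih]

theorem find_re_eq (text : String) : find_re text = find_re_alt text := by
  have hsp : (" " : String).toList = [' '] := rfl
  unfold find_re find_re_alt
  rw [find_re_loop_zero]
  by_cases hmem : ' ' ∈ text.toList
  · have hfind : PySem.Str.find text " " =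
        ((text.toList.takeWhile pvNS).length : Int) := by
      simp only [PySem.Str.find_eq, hsp, find_space, if_pos hmem]
    have hlen := pv_length_takeWhile_le text.toList
    have hne : PySem.Str.find text " " ≠ -1 := by rw [hfind]; omega
    simp only [hfind] at hne ⊢
    rw [if_neg hne]
    apply Prod.ext
    · apply String.toList_inj.mp
      rw [PySem.Str.toList_slice, PySem.Chars.slice_eq_listSlice, PySem.List.slice_to_natCast]
      simp [pv_take_len_takeWhile]
    · apply String.toList_inj.mp
      have hcast : ((text.toList.takeWhile pvNS).length : Int) + 1
          = (((text.toList.takeWhile pvNS).length + 1 : Nat) : Int) := by norm_cast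
      have hdrop : text.toList.drop ((text.toList.takeWhile pvNS).length + 1)
          = (text.toList.dropWhile pvNS).drop 1 := by
        calc text.toList.drop ((text.toList.takeWhile pvNS).length + 1)
            = (text.toList.takeWhile pvNS ++ text.toList.dropWhile pvNS).drop
                ((text.toList.takeWhile pvNS).length + 1) := by
              rw [List.takeWhile_append_dropWhile]
          _ = (text.toList.dropWhile pvNS).drop 1 := pv_drop_len_succ _ _
      rw [PySem.Str.toList_replace, PySem.Str.toList_slice, PySem.Chars.slice_eq_listSlice, hcast,
        PySem.List.slice_from_natCast, hdrop, hsp]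
      rw [show ("" : String).toList = [] from rfl, replace_space]
      simp
  · have hfind : PySem.Str.find text " " = -1 := by
      simp only [PySem.Str.find_eq, hsp, find_space, if_neg hmem]
    rw [hfind, if_pos rfl]
    have htk : text.toList.takeWhile pvNS = text.toList := by
      apply List.takeWhile_eq_self_iff.mpr
      intro c hc; simp [pvNS]; exact fun h => hmem (h ▸ hc)
    have hdw : text.toList.dropWhile pvNS = [] := by
      apply List.dropWhile_eq_nil_iff.mpr
      intro c hc; simp [pvNS]; exact fun h => hmem (h ▸ hc)
    apply Prod.ext
    · apply String.toList_inj.mp; simp [htk]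
    · simp [hdw]

-- ===== VERDICT (by name: the statement is the Claim_ definition above) =====
theorem find_re_spec : Claim_equal_find_re := by
  intro text _
  unfold Spec_find_re
  exact find_re_eq text
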